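-- pv_equiv track=rewrite | github.com/MickleG/ECE661 | hw7/hw7_michael_goldberg.py | check_if_code_uniform
-- ===== SOURCE A (Python) =====
-- def check_if_code_uniform(code):
--
-- 	# if code is 0 or negative, nonuniform for purposes of lbp
-- 	if code <= 0:
-- 		return False
--
-- 	# collect the unlabelled binary representation of the code
-- 	binary = bin(code)[2:]
--
-- 	# set previous bit to first bit
-- 	prev_bit = binary[0]
--
-- 	# if there is ever a situation where the previous bit is 1 and the next bit is 0, nonuniform
-- 	for bit in binary[1:]:
-- 		if(prev_bit == "1" and bit == "0"):
-- 			return False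
-- 		prev_bit = bit
--
-- 	return True
-- ===== SOURCE B (Python) =====
-- def check_if_code_uniform(code):
--     # uniform (no 1->0 transition in binary, which starts with 1) iff code = 2^k - 1
--     if code <= 0:
--         return False
--     return (code & (code + 1)) == 0
-- ===== Notes on version B (the rewrite author's own statement) =====
-- stated objective: idiomatic
-- what changed: The character-by-character scan of the binary string is replaced by a single closed-form bitwise test code & (code+1) == 0, which holds exactly when a positive code has all-ones binary form, i.e. no one-to-zero transition.
import Mathlib
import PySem

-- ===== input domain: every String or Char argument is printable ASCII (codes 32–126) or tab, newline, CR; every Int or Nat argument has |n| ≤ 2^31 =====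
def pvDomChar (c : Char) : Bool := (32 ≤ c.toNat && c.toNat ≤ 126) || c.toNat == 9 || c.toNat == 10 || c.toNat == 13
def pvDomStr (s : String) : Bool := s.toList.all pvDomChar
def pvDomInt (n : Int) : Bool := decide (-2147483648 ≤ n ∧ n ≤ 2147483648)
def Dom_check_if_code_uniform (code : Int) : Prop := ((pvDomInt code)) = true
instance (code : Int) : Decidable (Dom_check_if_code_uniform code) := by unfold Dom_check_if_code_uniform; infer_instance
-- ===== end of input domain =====

-- B replaces A's left-to-right scan of the binary string by the closed-form bit test
-- (code & (code+1)) == 0 after the same non-positive guard.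

-- ===== PORT A =====

-- bin(n)[2:] for n > 0: most-significant-bit-first binary digits, as characters
def pvBin (n : Nat) : List Char :=
  if n = 0 then [] else pvBin (n / 2) ++ [if n % 2 = 1 then '1' else '0']
decreasing_by exact Nat.div_lt_self (by omega) (by omega)

-- the for-loop of A: prev_bit state, early return False on a 1→0 transition
def pvLoopA (prev : Char) : List Char → Bool
  | [] => true
  | b :: rest => if prev = '1' ∧ b = '0' then false else pvLoopA b rest

def check_if_code_uniform (code : Int) : Bool :=
  if code ≤ 0 then false
  else
    match pvBin code.toNat with
    | [] => false        -- unreachable: bin of a positive int is nonempty (binary[0] would raise otherwise)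
    | p :: rest => pvLoopA p rest

-- ===== PORT B =====
def check_if_code_uniform_alt (code : Int) : Bool :=
  if code ≤ 0 then false
  else decide (PySem.Int.band code (code + 1) = 0)

-- ===== PRECONDITION & SPEC =====
def Spec_check_if_code_uniform (code : Int) (out : Bool) : Prop := out = check_if_code_uniform_alt code
instance (code : Int) (out : Bool) : Decidable (Spec_check_if_code_uniform code out) := by unfold Spec_check_if_code_uniform; infer_instance

-- ===== CLAIM (what is proved, stated in full; the proofs are below) =====
def Claim_equal_check_if_code_uniform : Prop := ∀ (code : Int), Dom_check_if_code_uniform code → Spec_check_if_code_uniform code (check_if_code_uniform code)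

-- ===== LEMMAS AND PROOFS =====

-- every character of pvBin n is '0' or '1'
theorem pvBin_chars (n : Nat) : ∀ c ∈ pvBin n, c = '0' ∨ c = '1' := by
  induction n using Nat.strong_induction_on with
  | _ n ih =>
    rw [pvBin]
    split
    · simp
    · intro c hc
      rcases List.mem_append.1 hc with h | h
      · exact ih (n / 2) (Nat.div_lt_self (by omega) (by omega)) c h
      · simp only [List.mem_singleton] at h
        subst h; split <;> simp

-- bin of a positive number starts with '1'
theorem pvBin_head (n : Nat) (hn : 0 < n) : ∃ t, pvBin n = '1' :: t := by
  induction n using Nat.strong_induction_on with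
  | _ n ih =>
    rw [pvBin]
    rw [if_neg (by omega)]
    by_cases h2 : n / 2 = 0
    · have h1 : n = 1 := by omega
      subst h1
      exact ⟨[], by simp [pvBin]⟩
    · obtain ⟨t, ht⟩ := ih (n / 2) (Nat.div_lt_self (by omega) (by omega)) (by omega)
      exact ⟨t ++ [if n % 2 = 1 then '1' else '0'], by rw [ht]; rfl⟩

-- A's scan with prev = '1' over 0/1 characters succeeds iff every character is '1'
theorem pvLoopA_ones (l : List Char) (hl : ∀ c ∈ l, c = '0' ∨ c = '1') :
    pvLoopA '1' l = true ↔ ∀ c ∈ l, c = '1' := by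
  induction l with
  | nil => simp [pvLoopA]
  | cons b rest ih =>
    have hb : b = '0' ∨ b = '1' := hl b (by simp)
    have hrest : ∀ c ∈ rest, c = '0' ∨ c = '1' := fun c hc => hl c (by simp [hc])
    rcases hb with hb | hb <;> subst hb
    · simp [pvLoopA]
    · rw [pvLoopA, if_neg (by simp), ih hrest]
      simp

-- all-ones unfolds along the binary recursion
theorem pvAllOnes_rec (n : Nat) :
    (∀ c ∈ pvBin n, c = '1') ↔ (n = 0 ∨ (n % 2 = 1 ∧ ∀ c ∈ pvBin (n / 2), c = '1')) := by
  by_cases h : n = 0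
  · subst h; simp [pvBin]
  · rw [pvBin, if_neg h]
    constructor
    · intro hall
      refine Or.inr ⟨?_, fun c hc => hall c (List.mem_append.2 (Or.inl hc))⟩
      have := hall (if n % 2 = 1 then '1' else '0') (List.mem_append.2 (Or.inr (by simp)))
      by_contra hodd
      rw [if_neg hodd] at this
      exact absurd this (by decide)
    · rintro (h0 | ⟨hodd, hall⟩)
      · exact absurd h0 h
      · intro c hc
        rcases List.mem_append.1 hc with hc | hc
        · exact hall c hc
        · simp only [List.mem_singleton] at hc
          subst hc; rw [if_pos hodd]

-- n &&& (n+1) = 0 unfolds along the same recursion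
theorem pvLand_rec (n : Nat) :
    (n &&& (n + 1) = 0) ↔ (n = 0 ∨ (n % 2 = 1 ∧ (n / 2) &&& (n / 2 + 1) = 0)) := by
  by_cases h0 : n = 0
  · subst h0; simp
  · rcases Nat.even_or_odd n with he | ho
    · -- n even, n ≠ 0: both sides false
      have hm2 : n % 2 = 0 := Nat.even_iff.1 he
      constructor
      · intro hz
        exfalso
        have hmpos : n / 2 ≠ 0 := by omega
        -- some bit of n/2 is set; the corresponding bit of n &&& (n+1) is set
        have hbit : ∃ i, (n / 2).testBit i = true := by
          by_contra hall
          refine hmpos (Nat.zero_of_testBit_eq_false fun i => ?_)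
          rcases Bool.eq_false_or_eq_true ((n / 2).testBit i) with h | h
          · exact absurd ⟨i, h⟩ hall
          · exact h
        obtain ⟨i, hi⟩ := hbit
        have h1 : n.testBit (i + 1) = true := by
          rw [Nat.testBit_add_one]; exact hi
        have h2 : (n + 1).testBit (i + 1) = true := by
          rw [Nat.testBit_add_one]
          have : (n + 1) / 2 = n / 2 := by omega
          rw [this]; exact hi
        have := congrArg (fun x => x.testBit (i + 1)) hz
        simp only [Nat.testBit_and, Nat.zero_testBit] at this
        rw [h1, h2] at this
        exact absurd this (by decide)
      · rintro (h | ⟨h, _⟩) <;> omega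
    · -- n odd: reduce bitwise
      have hm2 : n % 2 = 1 := Nat.odd_iff.1 ho
      have hdiv : (n + 1) / 2 = n / 2 + 1 := by omega
      have hiff : (n &&& (n + 1) = 0) ↔ ((n / 2) &&& (n / 2 + 1) = 0) := by
        constructor
        · intro hz
          apply Nat.zero_of_testBit_eq_false
          intro i
          have := congrArg (fun x => x.testBit (i + 1)) hz
          simp only [Nat.testBit_and, Nat.zero_testBit] at this
          rw [Nat.testBit_add_one, Nat.testBit_add_one, hdiv] at this
          simpa [Nat.testBit_and] using this
        · intro hz
          apply Nat.zero_of_testBit_eq_false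
          intro i
          cases i with
          | zero =>
            simp only [Nat.testBit_and]
            simp [Nat.testBit_zero]
            omega
          | succ i =>
            rw [Nat.testBit_and, Nat.testBit_add_one, Nat.testBit_add_one, hdiv]
            have := congrArg (fun x => x.testBit i) hz
            simp only [Nat.testBit_and, Nat.zero_testBit] at this
            exact this
      rw [hiff]
      omega

-- main characterisation: bin(n) is all ones iff n &&& (n+1) = 0
theorem pvMain (n : Nat) : (∀ c ∈ pvBin n, c = '1') ↔ (n &&& (n + 1) = 0) := by
  induction n using Nat.strong_induction_on with
  | _ n ih =>
    by_cases h0 : n = 0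
    · subst h0; simp [pvBin]
    · rw [pvAllOnes_rec, pvLand_rec,
        ih (n / 2) (Nat.div_lt_self (by omega) (by omega))]

-- ===== VERDICT (by name: the statement is the Claim_ definition above) =====
theorem check_if_code_uniform_spec : Claim_equal_check_if_code_uniform := by
  intro code _
  unfold Spec_check_if_code_uniform check_if_code_uniform check_if_code_uniform_alt
  by_cases hle : code ≤ 0
  · simp [hle]
  · rw [if_neg hle, if_neg hle]
    set n : Nat := code.toNat with hn
    have hnpos : 0 < n := by omega
    obtain ⟨t, ht⟩ := pvBin_head n hnpos
    rw [ht]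
    show pvLoopA '1' t = decide (PySem.Int.band code (code + 1) = 0)
    have hall : pvLoopA '1' t = true ↔ ∀ c ∈ pvBin n, c = '1' := by
      rw [pvLoopA_ones t (fun c hc => pvBin_chars n c (ht ▸ List.mem_cons_of_mem _ hc))]
      rw [ht]
      simp
    have hband : PySem.Int.band code (code + 1) = ((n &&& (n + 1) : Nat) : Int) := by
      have h1 : (0 : Int) ≤ code := by omega
      have h2 : (0 : Int) ≤ code + 1 := by omega
      rw [PySem.Int.band_of_nonneg h1 h2]
      congr 1
      have : (code + 1).toNat = n + 1 := by omega
      rw [this]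
    have key : pvLoopA '1' t = decide (n &&& (n + 1) = 0) := by
      by_cases hz : n &&& (n + 1) = 0
      · rw [hall.2 ((pvMain n).2 hz), decide_eq_true hz]
      · rw [Bool.eq_false_iff.2 (fun h => hz ((pvMain n).1 (hall.1 h))), decide_eq_false hz]
    rw [key, hband]
    simp
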